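-- pv_equiv track=rewrite | github.com/GHLisz/algorithm-exercises | lintcode/3-digit-counts.py | digitCounts
-- ===== SOURCE A (Python) =====
-- def digitCounts(k, n):
--     # write your code here
--     if n == 0 and k == 0:
--         return 1
--
--     cnt, base = 0, 1
--     while n // base > 0:
--         cur_bit = (n // base) % 10
--         higher = n // (base * 10)
--         lower = n - (n // base) * base
--         if cur_bit < k:
--             cnt += higher * base
--         elif cur_bit == k:
--             cnt += higher * base + lower + 1
--         else:
--             cnt += (higher + 1) * base
--         base *= 10
--
--     if k == 0 and n > 9:
--         return cnt - base // 10
--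
--     return cnt
-- ===== SOURCE B (Python) =====
-- def _digits(k, m):
--     # occurrences of digit k in the decimal digits of the single number m
--     cnt = 0
--     x = m
--     while x > 0:
--         if x % 10 == k:
--             cnt += 1
--         x //= 10
--     return cnt
--
--
-- def _count(k, n):
--     # occurrences of digit k in 0..n, for n >= 0
--     if n < 10:
--         return 1 if 0 <= k <= n else 0
--     m, d = divmod(n, 10)
--     # last-digit occurrences in 0..n, plus digit occurrences of the prefixes:
--     # each prefix x in 1..m-1 is completed by 10 last digits, the prefix m by d+1
--     return (m + (1 if d >= k else 0)
--             + 10 * (_count(k, m - 1) - (1 if k == 0 else 0))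
--             + _digits(k, m) * (d + 1))
--
--
-- def digitCounts(k, n):
--     if n < 0:
--         return 0
--     return _count(k, n)
-- ===== Notes on version B (the rewrite author's own statement) =====
-- stated objective: alternative
-- what changed: Replaces A's bottom-up per-position closed form (higher/current/lower arithmetic per power of ten plus a final k=0 correction) by a top-down recursion that splits off the last digit (count of k as last digit in 0..n, plus each prefix's digit count weighted by its number of completions, recursing on n//10 - 1), which also fixes A's leading-zero miscount for k=0.
-- intended difference: For k = 0 and n >= 100 A's single correction term base//10 does not remove all leading-zero overcounts, so A returns too large a count (e.g. A(0,100)=22), while B returns the true number of 0-digits in 0..n (B(0,100)=12), which is the intended value. — e.g. on digitCounts(0, 100): A returns 22, B returns 12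
-- outside the precondition, e.g. on digitCounts(-1, 5): A returns 1, B returns 0; on digitCounts(10, 100): A returns 20, B returns 10
import Mathlib
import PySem

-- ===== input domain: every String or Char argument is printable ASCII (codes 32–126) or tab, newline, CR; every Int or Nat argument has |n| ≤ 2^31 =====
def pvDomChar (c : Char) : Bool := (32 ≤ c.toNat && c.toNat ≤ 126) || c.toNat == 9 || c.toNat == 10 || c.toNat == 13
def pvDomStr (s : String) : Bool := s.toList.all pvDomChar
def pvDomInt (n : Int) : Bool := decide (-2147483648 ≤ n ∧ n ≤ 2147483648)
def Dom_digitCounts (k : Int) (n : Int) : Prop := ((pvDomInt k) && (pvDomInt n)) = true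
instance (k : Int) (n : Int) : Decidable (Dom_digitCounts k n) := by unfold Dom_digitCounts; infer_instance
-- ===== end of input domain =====

-- B replaces A's bottom-up per-position closed form by a top-down recursion that splits off the
-- last digit (alternative algorithm), and is correct for k = 0 where A's single base//10
-- correction miscounts leading zeros once n ≥ 100.

-- ===== PORT A =====
-- while n // base > 0: …  (fuel is only a totality guard: on the claimed domain |n| ≤ 2^31 < 10^40,
-- the loop runs at most 11 times, so fuel 40 never cuts it short)
def digitCountsGo (k n : Int) : Nat → Int → Int → Int × Int
  | 0, cnt, base => (cnt, base)
  | fuel + 1, cnt, base =>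
    if 0 < PySem.Int.floordiv n base then
      let cur_bit := PySem.Int.mod (PySem.Int.floordiv n base) 10
      let higher := PySem.Int.floordiv n (base * 10)
      let lower := n - PySem.Int.floordiv n base * base
      let cnt' := if cur_bit < k then cnt + higher * base
        else if cur_bit = k then cnt + (higher * base + lower + 1)
        else cnt + (higher + 1) * base
      digitCountsGo k n fuel cnt' (base * 10)
    else (cnt, base)

def digitCounts (k : Int) (n : Int) : Int :=
  if n = 0 ∧ k = 0 then 1
  else
    let r := digitCountsGo k n 40 0 1
    if k = 0 ∧ n > 9 then r.1 - PySem.Int.floordiv r.2 10 else r.1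

-- ===== PORT B =====
-- _digits: while x > 0 (fuel is only a totality guard: at most 11 digits on the claimed domain)
def digitCountsAltCount (k : Int) : Nat → Int → Int → Int
  | 0, _, cnt => cnt
  | fuel + 1, x, cnt =>
    if 0 < x then
      digitCountsAltCount k fuel (PySem.Int.floordiv x 10)
        (cnt + if PySem.Int.mod x 10 = k then 1 else 0)
    else cnt

-- _count: recursion on n -> n // 10 - 1 (fuel is only a totality guard: recursion depth is at
-- most the number of digits, ≤ 11 on the claimed domain)
def digitCountsAltGo (k : Int) : Nat → Int → Int
  | 0, _ => 0
  | fuel + 1, n =>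
    if n < 10 then (if 0 ≤ k ∧ k ≤ n then 1 else 0)
    else
      let m := PySem.Int.floordiv n 10
      let d := PySem.Int.mod n 10
      m + (if d ≥ k then 1 else 0)
        + 10 * (digitCountsAltGo k fuel (m - 1) - (if k = 0 then 1 else 0))
        + digitCountsAltCount k 40 m 0 * (d + 1)

def digitCounts_alt (k : Int) (n : Int) : Int :=
  if n < 0 then 0 else digitCountsAltGo k 40 n

-- ===== PRECONDITION & SPEC =====
-- Pre_ restricts k to the task's natural domain -- k is a decimal digit -- except when n ≤ 0,
-- where the count is trivial for every k and both programs agree; it excludes non-digit k with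
-- n > 0, on which A returns accidental positional sums that are not digit counts.
def Pre_digitCounts (k : Int) (n : Int) : Prop := (0 ≤ k ∧ k ≤ 9) ∨ n ≤ 0
instance (k : Int) (n : Int) : Decidable (Pre_digitCounts k n) := by unfold Pre_digitCounts; infer_instance
def pvWitness_digitCounts : Int × Int := (3, 12)

-- For k = 0 and n ≥ 100, A returns too large a value (its single 'base // 10' correction does not
-- remove all leading-zero overcounts, e.g. A 0 100 = 22), while B returns the true count of
-- 0-digits in 0..n (12 at that input), which is the intended value.
def D_digitCounts (k : Int) (n : Int) : Prop := k = 0 ∧ 100 ≤ n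
instance (k : Int) (n : Int) : Decidable (D_digitCounts k n) := by unfold D_digitCounts; infer_instance

def Spec_digitCounts (k : Int) (n : Int) (out : Int) : Prop := ¬ D_digitCounts k n → out = digitCounts_alt k n
instance (k : Int) (n : Int) (out : Int) : Decidable (Spec_digitCounts k n out) := by unfold Spec_digitCounts; infer_instance

def pvDiffWitness_digitCounts : Int × Int := (0, 100)
def pvDiffWitnessOut_digitCounts : Int × Int := (22, 12)

-- ===== CLAIM (what is proved, stated in full; the proofs are below) =====
def Claim_unchanged_digitCounts : Prop := ∀ (k : Int) (n : Int), Dom_digitCounts k n → Pre_digitCounts k n → Spec_digitCounts k n (digitCounts k n)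
def Claim_changed_digitCounts : Prop := Dom_digitCounts (pvDiffWitness_digitCounts.1) (pvDiffWitness_digitCounts.2) ∧ Pre_digitCounts (pvDiffWitness_digitCounts.1) (pvDiffWitness_digitCounts.2) ∧ D_digitCounts (pvDiffWitness_digitCounts.1) (pvDiffWitness_digitCounts.2) ∧ digitCounts (pvDiffWitness_digitCounts.1) (pvDiffWitness_digitCounts.2) = pvDiffWitnessOut_digitCounts.1 ∧ digitCounts_alt (pvDiffWitness_digitCounts.1) (pvDiffWitness_digitCounts.2) = pvDiffWitnessOut_digitCounts.2 ∧ pvDiffWitnessOut_digitCounts.1 ≠ pvDiffWitnessOut_digitCounts.2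

def Claim_exact_digitCounts : Prop := ∀ (k : Int) (n : Int), Dom_digitCounts k n → Pre_digitCounts k n → D_digitCounts k n → digitCounts k n ≠ digitCounts_alt k n

-- ===== LEMMAS AND PROOFS =====

-- Nat-side model of A's per-position summand
def stepN (k b n : ℕ) : ℕ :=
  if n / b % 10 < k then n / (b * 10) * b
  else if n / b % 10 = k then n / (b * 10) * b + n % b + 1
  else (n / (b * 10) + 1) * b

-- stepN through quotient/remainder
def gN (k b q r : ℕ) : ℕ :=
  if q % 10 < k then q / 10 * b
  else if q % 10 = k then q / 10 * b + r + 1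
  else (q / 10 + 1) * b

-- Nat-side digit count of one number (B's inner loop)
def cdig (k : ℕ) : ℕ → ℕ
  | 0 => 0
  | n + 1 => (if (n + 1) % 10 = k then 1 else 0) + cdig k ((n + 1) / 10)
decreasing_by omega

theorem stepN_eq_gN (k b n : ℕ) : stepN k b n = gN k b (n / b) (n % b) := by
  simp [stepN, gN, Nat.div_div_eq_div_mul]

theorem stepN_of_lt {k b n : ℕ} (hk : 1 ≤ k) (h : n < b) : stepN k b n = 0 := by
  have h1 : n / b = 0 := Nat.div_eq_of_lt h
  have h2 : n / (b * 10) = 0 := Nat.div_eq_of_lt (lt_of_lt_of_le h (Nat.le_mul_of_pos_right _ (by norm_num)))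
  have hpos : 0 < k := hk
  simp [stepN, h1, h2, hpos]

theorem gN_succ (k b n : ℕ) (hb : 0 < b) (hk9 : k ≤ 9) :
    gN k b ((n+1)/b) ((n+1)%b) = gN k b (n/b) (n%b) + (if (n + 1) / b % 10 = k then 1 else 0) := by
  have hdm := Nat.div_add_mod (n+1) b
  have hrb : (n+1) % b < b := Nat.mod_lt _ hb
  rcases Nat.eq_zero_or_pos ((n+1) % b) with hr | hr
  · set q := (n+1)/b with hqdef
    have hq1 : 1 ≤ q := by
      rcases Nat.eq_zero_or_pos q with h0 | h
      · rw [h0] at hdm; simp at hdm; omega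
      · exact h
    have e : b*(q-1) + b = b*q := by
      obtain ⟨t, ht⟩ := Nat.exists_eq_add_of_le hq1
      rw [show q - 1 = t by omega, ht]; ring
    have hn : n = b*(q-1) + (b-1) := by omega
    have h1 : n / b = q - 1 := by
      rw [hn, Nat.mul_add_div hb, Nat.div_eq_of_lt (by omega)]; omega
    have h2 : n % b = b - 1 := by
      rw [hn, Nat.mul_add_mod, Nat.mod_eq_of_lt (by omega)]
    rw [h1, h2, hr]
    have eplus : (q/10 + 1) * b = q/10 * b + b := by ring
    rcases Nat.eq_zero_or_pos (q % 10) with hc | hc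
    · have e1 : (q-1)/10 = q/10 - 1 := by omega
      have e2 : (q-1)%10 = 9 := by omega
      have hhq : 1 ≤ q/10 := by omega
      have e3 : (q/10 - 1)*b + b = q/10 * b := by
        obtain ⟨t, ht⟩ := Nat.exists_eq_add_of_le hhq
        rw [show q/10 - 1 = t by omega, show q/10 = t + 1 by omega]; ring
      have e4 : (q/10 - 1 + 1) * b = (q/10 - 1) * b + b := by ring
      unfold gN
      rw [e1, e2, hc]
      split_ifs <;> omega
    · have e1 : (q-1)/10 = q/10 := by omega
      have e2 : (q-1)%10 = q%10 - 1 := by omega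
      unfold gN
      rw [e1, e2]
      split_ifs <;> omega
  · set q := (n+1)/b with hqdef
    set r := (n+1)%b with hrdef
    have hn : n = b*q + (r - 1) := by omega
    have h1 : n / b = q := by
      rw [hn, Nat.mul_add_div hb, Nat.div_eq_of_lt (by omega)]; omega
    have h2 : n % b = r - 1 := by
      rw [hn, Nat.mul_add_mod, Nat.mod_eq_of_lt (by omega)]
    rw [h1, h2]
    unfold gN
    split_ifs <;> omega

theorem stepN_succ (k b n : ℕ) (hb : 0 < b) (hk9 : k ≤ 9) :
    stepN k b (n + 1) = stepN k b n + (if (n + 1) / b % 10 = k then 1 else 0) := by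
  rw [stepN_eq_gN, stepN_eq_gN]
  exact gN_succ k b n hb hk9

def sumStep (k n J : ℕ) : ℕ := ∑ j ∈ Finset.range J, stepN k (10 ^ j) n
def cdigU (k J i : ℕ) : ℕ := ∑ j ∈ Finset.range J, (if i / 10 ^ j % 10 = k then 1 else 0)

theorem cdigU_zero (k J : ℕ) (hk1 : 1 ≤ k) : cdigU k J 0 = 0 := by
  unfold cdigU
  refine Finset.sum_eq_zero fun j _ => ?_
  simp [Nat.zero_div]
  omega

theorem stepN_zero (k b : ℕ) : stepN k b 0 = if k = 0 then 1 else 0 := by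
  unfold stepN
  rcases Nat.eq_zero_or_pos k with h0 | h0
  · subst h0; simp
  · have hne : k ≠ 0 := by omega
    simp [h0, hne]

theorem sumStep_eq (k J : ℕ) (hk9 : k ≤ 9) (n : ℕ) :
    sumStep k n J = ∑ i ∈ Finset.range (n + 1), cdigU k J i := by
  induction n with
  | zero =>
    have h0 : sumStep k 0 J = ∑ _j ∈ Finset.range J, (if k = 0 then 1 else 0) :=
      Finset.sum_congr rfl fun j _ => stepN_zero k (10^j)
    have h1 : cdigU k J 0 = ∑ _j ∈ Finset.range J, (if k = 0 then 1 else 0) := by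
      unfold cdigU
      refine Finset.sum_congr rfl fun j _ => ?_
      rw [Nat.zero_div, Nat.zero_mod]
      by_cases h : k = 0
      · rw [if_pos h.symm, if_pos h]
      · rw [if_neg (fun hh => h hh.symm), if_neg h]
    rw [h0, Finset.sum_range_one, h1]
  | succ n ih =>
    have h : sumStep k (n+1) J = sumStep k n J + cdigU k J (n+1) := by
      unfold sumStep cdigU
      rw [← Finset.sum_add_distrib]
      exact Finset.sum_congr rfl fun j _ => stepN_succ k (10^j) n (by positivity) hk9
    rw [h, ih]
    exact (Finset.sum_range_succ _ _).symm

theorem cdig_succ (k i : ℕ) (hi : i ≠ 0) :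
    cdig k i = (if i % 10 = k then 1 else 0) + cdig k (i / 10) := by
  cases i with
  | zero => exact absurd rfl hi
  | succ m => rw [cdig]

theorem cdig_eq_cdigU (k : ℕ) (hk1 : 1 ≤ k) (J : ℕ) :
    ∀ i : ℕ, i < 10 ^ J → cdig k i = cdigU k J i := by
  induction J with
  | zero =>
    intro i hi
    interval_cases i
    simp [cdig, cdigU]
  | succ J ih =>
    intro i hi
    rcases Nat.eq_zero_or_pos i with h0 | h0
    · subst h0; rw [cdigU_zero k _ hk1]; simp [cdig]
    · rw [cdig_succ k i (by omega)]
      unfold cdigU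
      rw [Finset.sum_range_succ']
      have hdiv : i / 10 < 10 ^ J := by
        rw [Nat.div_lt_iff_lt_mul (by norm_num)]
        calc i < 10 ^ (J+1) := hi
        _ = 10 ^ J * 10 := by ring
      rw [ih (i/10) hdiv]
      unfold cdigU
      have hterm : ∀ x, i / 10 ^ (x+1) = i / 10 / 10 ^ x := by
        intro x
        rw [Nat.div_div_eq_div_mul]
        congr 1
        ring
      simp only [hterm, pow_zero, Nat.div_one]
      omega

-- A's loop computes the sum of stepN over bases 10^j (first component), for 0 ≤ n
theorem goA (k n : ℕ) (hk1 : 1 ≤ k) :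
    ∀ (fuel j : ℕ) (cnt : Int),
      (digitCountsGo (k : Int) (n : Int) fuel cnt ((10 ^ j : ℕ) : Int)).1
        = cnt + ((∑ t ∈ Finset.range fuel, stepN k (10 ^ (j + t)) n : ℕ) : Int) := by
  intro fuel
  induction fuel with
  | zero => intro j cnt; simp [digitCountsGo]
  | succ fuel ih =>
    intro j cnt
    have hfd : PySem.Int.floordiv (n:Int) ((10^j : ℕ):Int) = ((n / 10^j : ℕ):Int) :=
      PySem.Int.floordiv_natCast _ _
    by_cases hpos : (10:ℕ)^j ≤ n
    · have hq : 0 < n / 10^j := Nat.div_pos hpos (by positivity)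
      have hcond : 0 < PySem.Int.floordiv (n:Int) ((10^j : ℕ):Int) := by
        rw [hfd]; exact_mod_cast hq
      have hbase : ((10^j : ℕ):Int) * 10 = ((10^(j+1) : ℕ):Int) := by push_cast; ring
      have hhi : PySem.Int.floordiv (n:Int) (((10^j : ℕ):Int) * 10) = ((n / (10^j * 10) : ℕ):Int) := by
        rw [show ((10^j:ℕ):Int) * 10 = ((10^j*10 : ℕ):Int) by push_cast; ring]
        exact PySem.Int.floordiv_natCast _ _
      have hmd : PySem.Int.mod ((n / 10^j : ℕ):Int) 10 = ((n / 10^j % 10 : ℕ):Int) := by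
        exact_mod_cast PySem.Int.mod_natCast _ 10
      have hlow : (n:Int) - ((n / 10^j : ℕ):Int) * ((10^j : ℕ):Int) = ((n % 10^j : ℕ):Int) := by
        have h' : ((10^j :ℕ):Int) * ((n/10^j :ℕ):Int) + ((n % 10^j :ℕ):Int) = (n:Int) := by
          exact_mod_cast Nat.div_add_mod n (10^j)
        rw [mul_comm] at h'
        omega
      have hCNT : (if PySem.Int.mod (PySem.Int.floordiv (n:Int) ((10^j : ℕ):Int)) 10 < (k:Int) then
            cnt + PySem.Int.floordiv (n:Int) (((10^j : ℕ):Int) * 10) * ((10^j : ℕ):Int)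
          else if PySem.Int.mod (PySem.Int.floordiv (n:Int) ((10^j : ℕ):Int)) 10 = (k:Int) then
            cnt + (PySem.Int.floordiv (n:Int) (((10^j : ℕ):Int) * 10) * ((10^j : ℕ):Int)
              + ((n:Int) - PySem.Int.floordiv (n:Int) ((10^j : ℕ):Int) * ((10^j : ℕ):Int)) + 1)
          else cnt + (PySem.Int.floordiv (n:Int) (((10^j : ℕ):Int) * 10) + 1) * ((10^j : ℕ):Int))
          = cnt + ((stepN k (10^j) n : ℕ) : Int) := by
        rw [hfd, hmd, hhi, hlow]
        unfold stepN
        by_cases h1 : n/10^j%10 < k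
        · rw [if_pos (by exact_mod_cast h1), if_pos h1]; push_cast; ring
        · rw [if_neg (by exact_mod_cast h1), if_neg h1]
          by_cases h2 : n/10^j%10 = k
          · rw [if_pos (by exact_mod_cast h2), if_pos h2]; push_cast; ring
          · rw [if_neg (by exact_mod_cast h2), if_neg h2]; push_cast; ring
      rw [digitCountsGo, if_pos hcond]
      simp only [hbase] at hCNT
      simp only [hfd, hmd] at hCNT
      simp only [hfd, hmd, hbase]
      rw [ih (j+1)]
      rw [hCNT]
      have hsum : (∑ t ∈ Finset.range (fuel+1), stepN k (10 ^ (j + t)) n)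
          = (∑ t ∈ Finset.range fuel, stepN k (10 ^ (j + 1 + t)) n) + stepN k (10^j) n := by
        rw [Finset.sum_range_succ', Nat.add_zero]
        congr 1
        exact Finset.sum_congr rfl fun t _ => by rw [show j + (t+1) = j+1+t by omega]
      rw [hsum]
      push_cast
      ring
    · have hcond : ¬ 0 < PySem.Int.floordiv (n:Int) ((10^j : ℕ):Int) := by
        rw [hfd]
        have : n / 10^j = 0 := Nat.div_eq_of_lt (by omega)
        rw [this]
        simp
      rw [digitCountsGo, if_neg hcond]
      have hlt : n < 10^j := by omega
      have hz : (∑ t ∈ Finset.range (fuel+1), stepN k (10 ^ (j + t)) n) = 0 :=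
        Finset.sum_eq_zero fun t _ => stepN_of_lt hk1
          (lt_of_lt_of_le hlt (Nat.pow_le_pow_right (by norm_num) (by omega)))
      rw [hz]
      simp

-- B's inner loop is cdig
theorem countK (k : ℕ) : ∀ (fuel i : ℕ), i < 10 ^ fuel → ∀ total : Int,
    digitCountsAltCount (k : Int) fuel (i : Int) total = total + (cdig k i : Int) := by
  intro fuel
  induction fuel with
  | zero =>
    intro i hi total
    interval_cases i
    simp [digitCountsAltCount, cdig]
  | succ fuel ih =>
    intro i hi total
    rcases Nat.eq_zero_or_pos i with h0 | h0
    · subst h0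
      simp [digitCountsAltCount, cdig]
    · have hcond : (0 : Int) < (i : Int) := by exact_mod_cast h0
      have hfd : PySem.Int.floordiv (i : Int) 10 = ((i / 10 : ℕ) : Int) := by
        exact_mod_cast PySem.Int.floordiv_natCast i 10
      have hmd : PySem.Int.mod (i : Int) 10 = ((i % 10 : ℕ) : Int) := by
        exact_mod_cast PySem.Int.mod_natCast i 10
      have hdiv : i / 10 < 10 ^ fuel := by
        rw [Nat.div_lt_iff_lt_mul (by norm_num)]
        calc i < 10 ^ (fuel+1) := hi
        _ = 10 ^ fuel * 10 := by ring
      rw [digitCountsAltCount, if_pos hcond, hfd, hmd, ih (i/10) hdiv]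
      rw [cdig_succ k i (by omega)]
      have hind : (if ((i % 10 : ℕ) : Int) = (k : Int) then (1:Int) else 0)
          = (((if i % 10 = k then 1 else 0) : ℕ) : Int) := by
        by_cases h : i % 10 = k
        · simp [h]
        · rw [if_neg h, if_neg (by exact_mod_cast h)]
          simp
      rw [hind]
      push_cast
      ring

-- B's fold is the sum of cdig, for 1 ≤ k
theorem cdig_zero (k : ℕ) : cdig k 0 = 0 := by simp [cdig]

theorem cdig_small (k y : ℕ) (h1 : 1 ≤ y) (h9 : y ≤ 9) :
    cdig k y = if y = k then 1 else 0 := by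
  rw [cdig_succ k y (by omega), Nat.mod_eq_of_lt (by omega), Nat.div_eq_of_lt (by omega),
    cdig_zero, Nat.add_zero]

theorem indSumD (k d : ℕ) :
    (∑ y ∈ Finset.range (d+1), if y = k then 1 else 0) = if k ≤ d then 1 else 0 := by
  rw [Finset.sum_ite_eq' (Finset.range (d+1)) k (fun _ => (1:ℕ))]
  simp

theorem indSum10 (k : ℕ) :
    (∑ y ∈ Finset.range 10, if y = k then 1 else 0) = if k ≤ 9 then (1:ℕ) else 0 := by
  have h := indSumD k 9
  simpa using h

theorem sumRangeAdd (f : ℕ → ℕ) (a b : ℕ) :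
    (∑ i ∈ Finset.range (a+b), f i)
      = (∑ i ∈ Finset.range a, f i) + ∑ j ∈ Finset.range b, f (a+j) := by
  induction b with
  | zero => simp
  | succ b ih =>
    rw [show a + (b+1) = (a+b) + 1 by ring, Finset.sum_range_succ, ih, Finset.sum_range_succ]
    omega

theorem cdig_term (k m y : ℕ) (hm : 1 ≤ m) (hy : y ≤ 9) :
    cdig k (10*m + y) = (if y = k then 1 else 0) + cdig k m := by
  have h1 : (10*m+y) % 10 = y := by
    rw [Nat.mul_add_mod]; exact Nat.mod_eq_of_lt (by omega)
  have h2 : (10*m+y) / 10 = m := by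
    rw [Nat.mul_add_div (by norm_num), Nat.div_eq_of_lt (by omega)]
    omega
  rw [cdig_succ k _ (by omega), h1, h2]



theorem cdig_block (k m : ℕ) (hm : 1 ≤ m) (hk : k ≤ 9) :
    (∑ i ∈ Finset.range (10*m), cdig k i) + (if k = 0 then 1 else 0)
      = m + 10 * ∑ x ∈ Finset.range m, cdig k x := by
  induction m with
  | zero => omega
  | succ m ih =>
    rcases Nat.eq_zero_or_pos m with h0 | h0
    · subst h0
      have h1 : ∀ i ∈ Finset.range 10, cdig k i
          = if i = 0 then 0 else if i = k then 1 else 0 := by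
        intro i hi
        have : i < 10 := Finset.mem_range.mp hi
        rcases Nat.eq_zero_or_pos i with hz | hz
        · subst hz; simp [cdig_zero]
        · rw [cdig_small k i (by omega) (by omega), if_neg (show ¬ i = 0 by omega)]
      rw [show 10*1 = 10 by norm_num, Finset.sum_congr rfl h1, Finset.sum_range_one, cdig_zero]
      interval_cases k <;> decide
    · have ihh := ih h0
      rw [show 10*(m+1) = 10*m + 10 by ring, sumRangeAdd]
      have h2 : ∀ y ∈ Finset.range 10, cdig k (10*m + y)
          = (if y = k then 1 else 0) + cdig k m := fun y hy =>
        cdig_term k m y h0 (by have := Finset.mem_range.mp hy; omega)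
      rw [Finset.sum_congr rfl h2, Finset.sum_add_distrib, indSum10, Finset.sum_const,
        Finset.card_range, smul_eq_mul, Finset.sum_range_succ]
      have hk9 : (if k ≤ 9 then (1:ℕ) else 0) = 1 := if_pos hk
      rw [hk9]
      set S := ∑ x ∈ Finset.range m, cdig k x
      set c := cdig k m
      set a0 := (if k = 0 then (1:ℕ) else 0)
      omega

theorem cdig_tail (k m d : ℕ) (hm : 1 ≤ m) (hd : d ≤ 9) :
    (∑ y ∈ Finset.range (d+1), cdig k (10*m + y))
      = (d+1) * cdig k m + (if k ≤ d then 1 else 0) := by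
  have h2 : ∀ y ∈ Finset.range (d+1), cdig k (10*m + y)
      = (if y = k then 1 else 0) + cdig k m := fun y hy =>
    cdig_term k m y hm (by have := Finset.mem_range.mp hy; omega)
  rw [Finset.sum_congr rfl h2, Finset.sum_add_distrib, indSumD, Finset.sum_const,
    Finset.card_range, smul_eq_mul]
  ring

theorem cdig_main (k n : ℕ) (hk : k ≤ 9) (hn : 10 ≤ n) :
    (∑ i ∈ Finset.range (n+1), cdig k i) + (if k = 0 then 1 else 0)
      = n/10 + (if k ≤ n % 10 then 1 else 0) + 10 * (∑ x ∈ Finset.range (n/10), cdig k x)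
        + (n % 10 + 1) * cdig k (n/10) := by
  have hm : 1 ≤ n/10 := by omega
  have hd : n % 10 ≤ 9 := by omega
  have hsplit : n + 1 = 10*(n/10) + (n % 10 + 1) := by omega
  rw [hsplit, sumRangeAdd, cdig_tail k (n/10) (n % 10) hm hd]
  have hb := cdig_block k (n/10) hm hk
  set S1 := ∑ i ∈ Finset.range (10 * (n/10)), cdig k i
  set S2 := ∑ x ∈ Finset.range (n/10), cdig k x
  set c := (n % 10 + 1) * cdig k (n/10)
  set a0 := (if k = 0 then (1:ℕ) else 0)
  set a1 := (if k ≤ n % 10 then (1:ℕ) else 0)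
  omega

theorem smallT (k n : ℕ) (hk : k ≤ 9) (hn : n ≤ 9) :
    ((if k = 0 then 1 else 0) + ∑ i ∈ Finset.range (n+1), cdig k i)
      = if k ≤ n then 1 else 0 := by
  have h1 : ∀ i ∈ Finset.range (n+1), cdig k i
      = if i = 0 then 0 else if i = k then 1 else 0 := by
    intro i hi
    have : i < n+1 := Finset.mem_range.mp hi
    rcases Nat.eq_zero_or_pos i with hz | hz
    · subst hz; simp [cdig_zero]
    · rw [cdig_small k i (by omega) (by omega), if_neg (show ¬ i = 0 by omega)]
  rw [Finset.sum_congr rfl h1]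
  interval_cases n <;> interval_cases k <;> decide

theorem altGoN (k : ℕ) (hk : k ≤ 9) :
    ∀ fuel : ℕ, fuel + 1 ≤ 40 → ∀ n : ℕ, n < 10 ^ fuel →
      digitCountsAltGo (k : Int) (fuel+1) (n : Int)
        = (((if k = 0 then 1 else 0) + ∑ i ∈ Finset.range (n+1), cdig k i : ℕ) : Int) := by
  intro fuel
  induction fuel with
  | zero =>
    intro _ n hn
    interval_cases n
    rw [digitCountsAltGo, if_pos (by norm_num), smallT k 0 hk (by norm_num)]
    by_cases h0 : k = 0
    · subst h0; norm_num
    · have hne : ¬ ((0:Int) ≤ (k:Int) ∧ (k:Int) ≤ ((0:ℕ):Int)) := by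
        rintro ⟨hh1, hh2⟩
        have hk0' : (k:Int) = 0 := le_antisymm (by exact_mod_cast hh2) hh1
        exact h0 (by exact_mod_cast hk0')
      rw [if_neg hne, if_neg (show ¬ k ≤ 0 by omega)]
      norm_num
  | succ fuel ih =>
    intro hfuel n hn
    by_cases hsmall : n < 10
    · rw [digitCountsAltGo, if_pos (by exact_mod_cast hsmall), smallT k n hk (by omega)]
      by_cases hkn : k ≤ n
      · rw [if_pos hkn, if_pos ⟨by positivity, by exact_mod_cast hkn⟩]
        norm_num
      · rw [if_neg hkn, if_neg ?_]
        · norm_num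
        · rintro ⟨h1, h2⟩
          exact hkn (by exact_mod_cast h2)
    · have hm1 : 1 ≤ n/10 := by omega
      have hfd : PySem.Int.floordiv (n:Int) 10 = ((n / 10 : ℕ) : Int) := by
        exact_mod_cast PySem.Int.floordiv_natCast n 10
      have hmd : PySem.Int.mod (n:Int) 10 = ((n % 10 : ℕ) : Int) := by
        exact_mod_cast PySem.Int.mod_natCast n 10
      rw [digitCountsAltGo, if_neg (by exact_mod_cast hsmall)]
      simp only [hfd, hmd]
      have hmm : ((n / 10 : ℕ) : Int) - 1 = ((n / 10 - 1 : ℕ) : Int) := by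
        have : 1 ≤ n/10 := hm1
        push_cast [this]
        ring
      rw [hmm]
      have hrec : digitCountsAltGo (k:Int) (fuel+1) ((n / 10 - 1 : ℕ) : Int)
          = (((if k = 0 then 1 else 0) + ∑ i ∈ Finset.range ((n/10-1)+1), cdig k i : ℕ) : Int) := by
        refine ih (by omega) (n/10-1) ?_
        have : n / 10 < 10 ^ fuel := by
          rw [Nat.div_lt_iff_lt_mul (by norm_num)]
          calc n < 10 ^ (fuel+1) := hn
          _ = 10 ^ fuel * 10 := by ring
        omega
      rw [hrec]
      have hdig : digitCountsAltCount (k:Int) 40 ((n / 10 : ℕ) : Int) 0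
          = ((cdig k (n/10) : ℕ) : Int) := by
        rw [countK k 40 (n/10) ?_ 0]
        · ring
        · have h31 : n < 10 ^ 40 := lt_of_lt_of_le hn (Nat.pow_le_pow_right (by norm_num) (by omega))
          omega
      rw [hdig]
      have hmain := cdig_main k n hk (by omega)
      have hrange : (n/10-1)+1 = n/10 := by omega
      rw [hrange]
      -- turn the Int-side if-terms into casts of the Nat-side if-terms, then linear arithmetic
      have e1 : (if ((n % 10 : ℕ) : Int) ≥ (k : Int) then (1:Int) else 0)
          = (((if k ≤ n % 10 then 1 else 0) : ℕ) : Int) := by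
        by_cases h : k ≤ n % 10
        · rw [if_pos (by exact_mod_cast h), if_pos h]; norm_num
        · rw [if_neg (fun hh => h (by exact_mod_cast hh)), if_neg h]; norm_num
      have e2 : (if (k : Int) = 0 then (1:Int) else 0)
          = (((if k = 0 then 1 else 0) : ℕ) : Int) := by
        by_cases h : k = 0
        · rw [if_pos (by exact_mod_cast h), if_pos h]; norm_num
        · rw [if_neg (fun hh => h (by exact_mod_cast hh)), if_neg h]; norm_num
      have e3 : ((cdig k (n/10) : ℕ) : Int) * (((n % 10 : ℕ) : Int) + 1)
          = (((n % 10 + 1) * cdig k (n/10) : ℕ) : Int) := by push_cast; ring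
      rw [e1, e2, e3]
      omega

theorem altB (k : ℕ) (hk : k ≤ 9) (n : ℕ) (hn : n < 10 ^ 39) :
    digitCounts_alt (k : Int) (n : Int)
      = (((if k = 0 then 1 else 0) + ∑ i ∈ Finset.range (n+1), cdig k i : ℕ) : Int) := by
  unfold digitCounts_alt
  rw [if_neg (by omega), show (40:ℕ) = 39+1 from rfl]
  exact altGoN k hk 39 (by norm_num) n hn

theorem alt_neg (k n : Int) (hn : n < 0) : digitCounts_alt k n = 0 := by
  unfold digitCounts_alt
  rw [if_pos hn]

theorem a_neg (k n : Int) (hn : n < 0) : digitCounts k n = 0 := by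
  unfold digitCounts
  have h1 : PySem.Int.floordiv n 1 = n := by
    rw [PySem.Int.floordiv_eq_ediv_of_pos (by norm_num)]; simp
  have : digitCountsGo k n 40 0 1 = (0, 1) := by
    unfold digitCountsGo
    rw [h1]
    simp [not_lt.mpr (le_of_lt hn)]
  rw [if_neg (by omega)]
  simp [this]

theorem alt_zero (k : Int) (hk : k ≠ 0) : digitCounts_alt k 0 = 0 := by
  unfold digitCounts_alt
  rw [if_neg (by norm_num), show (40:ℕ) = 39+1 from rfl, digitCountsAltGo,
    if_pos (by norm_num : (0:Int) < 10),
    if_neg (fun h => hk (le_antisymm h.2 h.1))]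

theorem a_zero (k : Int) (hk : k ≠ 0) : digitCounts k 0 = 0 := by
  unfold digitCounts
  have h1 : PySem.Int.floordiv 0 1 = (0:Int) := by
    rw [PySem.Int.floordiv_eq_ediv_of_pos (by norm_num)]; simp
  have hgo : digitCountsGo k 0 40 0 1 = (0, 1) := by
    unfold digitCountsGo
    rw [h1]
    simp
  rw [if_neg (fun h => hk h.2)]
  simp [hgo]


-- ===== tightness machinery: A's k = 0 overcount (leading zeros) is strictly positive for n ≥ 100 =====

-- number of decimal digits (0 for 0)
def lenN : ℕ → ℕ
  | 0 => 0
  | n + 1 => lenN ((n + 1) / 10) + 1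
decreasing_by omega

theorem lenN_zero : lenN 0 = 0 := by simp [lenN]

theorem lenN_succ (i : ℕ) (h : i ≠ 0) : lenN i = lenN (i / 10) + 1 := by
  cases i with
  | zero => exact absurd rfl h
  | succ m => rw [lenN]

theorem lenN_le (J : ℕ) : ∀ i, i < 10 ^ J → lenN i ≤ J := by
  induction J with
  | zero =>
    intro i hi
    interval_cases i
    simp [lenN_zero]
  | succ J ih =>
    intro i hi
    rcases Nat.eq_zero_or_pos i with h0 | h0
    · subst h0; simp [lenN_zero]
    · rw [lenN_succ i (by omega)]
      have hdiv : i / 10 < 10 ^ J := by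
        rw [Nat.div_lt_iff_lt_mul (by norm_num)]
        calc i < 10 ^ (J+1) := hi
        _ = 10 ^ J * 10 := by ring
      have := ih (i/10) hdiv
      omega

theorem cdigU_step (k J i : ℕ) :
    cdigU k (J+1) i = (if i % 10 = k then 1 else 0) + cdigU k J (i / 10) := by
  unfold cdigU
  rw [Finset.sum_range_succ']
  have hterm : ∀ x, i / 10 ^ (x+1) = i / 10 / 10 ^ x := by
    intro x
    rw [Nat.div_div_eq_div_mul]
    congr 1
    ring
  simp only [hterm, pow_zero, Nat.div_one]
  omega

theorem cdigU0 (J : ℕ) : ∀ i, i < 10 ^ J → cdigU 0 J i + lenN i = cdig 0 i + J := by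
  induction J with
  | zero =>
    intro i hi
    interval_cases i
    simp [cdigU, cdig_zero, lenN_zero]
  | succ J ih =>
    intro i hi
    rcases Nat.eq_zero_or_pos i with h0 | h0
    · subst h0
      have h1 := ih 0 (by positivity)
      rw [cdigU_step, Nat.zero_div, Nat.zero_mod, if_pos rfl]
      simp [cdig_zero, lenN_zero] at h1 ⊢
      omega
    · rw [cdigU_step, lenN_succ i (by omega), cdig_succ 0 i (by omega)]
      have hdiv : i / 10 < 10 ^ J := by
        rw [Nat.div_lt_iff_lt_mul (by norm_num)]
        calc i < 10 ^ (J+1) := hi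
        _ = 10 ^ J * 10 := by ring
      have := ih (i/10) hdiv
      omega

theorem sum_cdigU0 (J n : ℕ) (hn : n < 10 ^ J) :
    (∑ i ∈ Finset.range (n+1), cdigU 0 J i) + (∑ i ∈ Finset.range (n+1), lenN i)
      = (∑ i ∈ Finset.range (n+1), cdig 0 i) + (n+1) * J := by
  rw [← Finset.sum_add_distrib]
  have h : ∀ i ∈ Finset.range (n+1), cdigU 0 J i + lenN i = cdig 0 i + J := by
    intro i hi
    exact cdigU0 J i (by have := Finset.mem_range.mp hi; omega)
  rw [Finset.sum_congr rfl h, Finset.sum_add_distrib, Finset.sum_const, Finset.card_range,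
    smul_eq_mul]

-- A's loop for k = 0: runs exactly up to the number of digits and leaves base = 10^(log+1)
theorem goA0 (n : ℕ) (hn : 1 ≤ n) :
    ∀ (fuel j : ℕ) (cnt : Int), n < 10 ^ (j + fuel) →
      digitCountsGo 0 (n : Int) fuel cnt ((10 ^ j : ℕ) : Int)
        = (cnt + ((∑ t ∈ Finset.Ico j (Nat.log 10 n + 1), stepN 0 (10 ^ t) n : ℕ) : Int),
           ((10 ^ (max j (Nat.log 10 n + 1)) : ℕ) : Int)) := by
  intro fuel
  induction fuel with
  | zero =>
    intro j cnt h
    have hlt : Nat.log 10 n < j :=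
      (Nat.lt_pow_iff_log_lt (by norm_num) (by omega)).mp (by simpa using h)
    rw [digitCountsGo, Finset.Ico_eq_empty (by simp; omega), Nat.max_eq_left (by omega)]
    simp
  | succ fuel ih =>
    intro j cnt h
    have hfd : PySem.Int.floordiv (n:Int) ((10^j : ℕ):Int) = ((n / 10^j : ℕ):Int) :=
      PySem.Int.floordiv_natCast _ _
    by_cases hpos : (10:ℕ)^j ≤ n
    · have hjL : j ≤ Nat.log 10 n := (Nat.pow_le_iff_le_log (by norm_num) (by omega)).mp hpos
      have hq : 0 < n / 10^j := Nat.div_pos hpos (by positivity)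
      have hcond : 0 < PySem.Int.floordiv (n:Int) ((10^j : ℕ):Int) := by
        rw [hfd]; exact_mod_cast hq
      have hbase : ((10^j : ℕ):Int) * 10 = ((10^(j+1) : ℕ):Int) := by push_cast; ring
      have hhi : PySem.Int.floordiv (n:Int) (((10^j : ℕ):Int) * 10) = ((n / (10^j * 10) : ℕ):Int) := by
        rw [show ((10^j:ℕ):Int) * 10 = ((10^j*10 : ℕ):Int) by push_cast; ring]
        exact PySem.Int.floordiv_natCast _ _
      have hmd : PySem.Int.mod ((n / 10^j : ℕ):Int) 10 = ((n / 10^j % 10 : ℕ):Int) := by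
        exact_mod_cast PySem.Int.mod_natCast _ 10
      have hlow : (n:Int) - ((n / 10^j : ℕ):Int) * ((10^j : ℕ):Int) = ((n % 10^j : ℕ):Int) := by
        have h' : ((10^j :ℕ):Int) * ((n/10^j :ℕ):Int) + ((n % 10^j :ℕ):Int) = (n:Int) := by
          exact_mod_cast Nat.div_add_mod n (10^j)
        rw [mul_comm] at h'
        omega
      have hCNT : (if PySem.Int.mod (PySem.Int.floordiv (n:Int) ((10^j : ℕ):Int)) 10 < (0:Int) then
            cnt + PySem.Int.floordiv (n:Int) (((10^j : ℕ):Int) * 10) * ((10^j : ℕ):Int)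
          else if PySem.Int.mod (PySem.Int.floordiv (n:Int) ((10^j : ℕ):Int)) 10 = (0:Int) then
            cnt + (PySem.Int.floordiv (n:Int) (((10^j : ℕ):Int) * 10) * ((10^j : ℕ):Int)
              + ((n:Int) - PySem.Int.floordiv (n:Int) ((10^j : ℕ):Int) * ((10^j : ℕ):Int)) + 1)
          else cnt + (PySem.Int.floordiv (n:Int) (((10^j : ℕ):Int) * 10) + 1) * ((10^j : ℕ):Int))
          = cnt + ((stepN 0 (10^j) n : ℕ) : Int) := by
        rw [hfd, hmd, hhi, hlow]
        unfold stepN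
        rw [if_neg (show ¬ ((n / 10^j % 10 : ℕ):Int) < 0 by omega),
          if_neg (show ¬ n / 10^j % 10 < 0 by omega)]
        by_cases h2 : n/10^j%10 = 0
        · rw [if_pos (show ((n / 10^j % 10 : ℕ):Int) = 0 by exact_mod_cast h2), if_pos h2]
          push_cast; ring
        · rw [if_neg (show ¬ ((n / 10^j % 10 : ℕ):Int) = 0 by exact_mod_cast h2), if_neg h2]
          push_cast; ring
      rw [digitCountsGo, if_pos hcond]
      simp only [hbase] at hCNT
      simp only [hfd, hmd] at hCNT
      simp only [hfd, hmd, hbase]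
      rw [ih (j+1) _ (by rw [show j+1+fuel = j + (fuel+1) by ring]; exact h)]
      rw [hCNT]
      have hsum : (∑ t ∈ Finset.Ico j (Nat.log 10 n + 1), stepN 0 (10 ^ t) n)
          = stepN 0 (10^j) n + ∑ t ∈ Finset.Ico (j+1) (Nat.log 10 n + 1), stepN 0 (10 ^ t) n :=
        Finset.sum_eq_sum_Ico_succ_bot (by omega) _
      have hmax : max (j+1) (Nat.log 10 n + 1) = max j (Nat.log 10 n + 1) := by omega
      rw [hsum, hmax, Prod.mk.injEq]
      refine ⟨by push_cast; ring, rfl⟩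
    · have hlt : Nat.log 10 n < j := by
        by_contra hc
        exact hpos ((Nat.pow_le_iff_le_log (by norm_num) (by omega)).mpr (by omega))
      have hcond : ¬ 0 < PySem.Int.floordiv (n:Int) ((10^j : ℕ):Int) := by
        rw [hfd, Nat.div_eq_of_lt (by omega)]
        simp
      rw [digitCountsGo, if_neg hcond, Finset.Ico_eq_empty (by simp; omega),
        Nat.max_eq_left (by omega)]
      simp

theorem aA0 (N : ℕ) (h10 : 10 ≤ N) (hb : N < 10 ^ 40) :
    digitCounts 0 (N:Int)
      = ((∑ t ∈ Finset.range (Nat.log 10 N + 1), stepN 0 (10 ^ t) N : ℕ) : Int)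
        - ((10 ^ Nat.log 10 N : ℕ) : Int) := by
  have hNne : (N:Int) ≠ 0 := by exact_mod_cast (by omega : N ≠ 0)
  unfold digitCounts
  rw [if_neg (fun h => hNne h.1)]
  simp only []
  rw [show ((1:Int)) = ((10 ^ 0 : ℕ):Int) by norm_num]
  rw [goA0 N (by omega) 40 0 0 (by simpa using hb)]
  rw [if_pos (⟨by norm_num, by exact_mod_cast (by omega : 9 < N)⟩ : _ ∧ _)]
  have hmax : max 0 (Nat.log 10 N + 1) = Nat.log 10 N + 1 := by omega
  have hfd : PySem.Int.floordiv ((10 ^ (Nat.log 10 N + 1) : ℕ) : Int) 10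
      = ((10 ^ (Nat.log 10 N + 1) / 10 : ℕ) : Int) := by
    exact_mod_cast PySem.Int.floordiv_natCast _ 10
  have hpow : (10:ℕ) ^ (Nat.log 10 N + 1) / 10 = 10 ^ Nat.log 10 N := by
    rw [pow_succ]
    omega
  have hIco : Finset.Ico 0 (Nat.log 10 N + 1) = Finset.range (Nat.log 10 N + 1) := by
    rw [Finset.range_eq_Ico]
  simp only [hmax, hfd, hpow, hIco]
  push_cast
  ring

-- lower bound on the slack (L+1) - lenN over 0..n
theorem slack_sum (L n : ℕ) (hL : 2 ≤ L) (hln : 10 ^ L ≤ n) (hup : n < 10 ^ (L+1)) :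
    (∑ i ∈ Finset.range (n+1), lenN i) + 10 ^ L + 2 ≤ (n+1) * (L+1) := by
  have hle : ∀ i ∈ Finset.range (n+1), lenN i ≤ L + 1 := by
    intro i hi
    exact lenN_le (L+1) i (by have := Finset.mem_range.mp hi; omega)
  have hpoint : ∀ i ∈ Finset.range (n+1),
      lenN i + ((if i = 0 then L else 0) + (if i < 10 ^ L then 1 else 0)) ≤ L + 1 := by
    intro i hi
    rcases Nat.eq_zero_or_pos i with h0 | h0
    · subst h0; simp [lenN_zero]
    · by_cases hsm : i < 10 ^ L
      · have := lenN_le L i hsm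
        rw [if_neg (by omega), if_pos hsm]
        omega
      · rw [if_neg (by omega), if_neg hsm]
        have := hle i hi
        omega
  have hsum := Finset.sum_le_sum hpoint
  rw [Finset.sum_add_distrib, Finset.sum_add_distrib, Finset.sum_const, Finset.card_range,
    smul_eq_mul, mul_comm] at hsum
  have h1 : (∑ i ∈ Finset.range (n+1), if i = 0 then L else 0) = L := by
    rw [Finset.sum_ite_eq' (Finset.range (n+1)) 0 (fun _ => L)]
    simp
  have h2 : (∑ i ∈ Finset.range (n+1), if i < 10 ^ L then 1 else 0) = 10 ^ L := by
    have hsplit : n + 1 = 10 ^ L + (n + 1 - 10 ^ L) := by omega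
    rw [hsplit, sumRangeAdd]
    have ha : (∑ i ∈ Finset.range (10 ^ L), if i < 10 ^ L then (1:ℕ) else 0)
        = ∑ i ∈ Finset.range (10 ^ L), 1 :=
      Finset.sum_congr rfl fun i hi => if_pos (Finset.mem_range.mp hi)
    have hb2 : (∑ j ∈ Finset.range (n + 1 - 10 ^ L), if 10 ^ L + j < 10 ^ L then (1:ℕ) else 0)
        = 0 :=
      Finset.sum_eq_zero fun j _ => if_neg (by omega)
    rw [ha, hb2, Finset.sum_const, Finset.card_range, smul_eq_mul]
    omega
  rw [h1, h2] at hsum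
  have hbf : (L+1) * (n+1) = (n+1) * (L+1) := by ring
  omega

-- ===== VERDICT (by name: the statement is the Claim_ definition above) =====
set_option maxRecDepth 40000 in
set_option maxHeartbeats 2000000 in
theorem digitCounts_spec : Claim_unchanged_digitCounts := by
  intro k n hDom hPre
  unfold Spec_digitCounts
  intro hnD
  simp only [Dom_digitCounts, pvDomInt, Bool.and_eq_true, decide_eq_true_eq] at hDom
  obtain ⟨⟨hdk1, hdk2⟩, hdn1, hdn2⟩ := hDom
  unfold Pre_digitCounts at hPre
  rcases lt_or_ge n 0 with hn | hn
  · rw [a_neg k n hn, alt_neg k n hn]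
  · by_cases hk09 : 0 ≤ k ∧ k ≤ 9
    · obtain ⟨hkp0, hkp9⟩ := hk09
      by_cases hk0 : k = 0
      · subst hk0
        have hn100 : n < 100 := by
          by_contra h
          exact hnD ⟨rfl, by omega⟩
        obtain ⟨N, rfl⟩ : ∃ N : ℕ, n = (N:Int) := ⟨n.toNat, (Int.toNat_of_nonneg hn).symm⟩
        have hN : N < 100 := by exact_mod_cast hn100
        have hall : ((List.range 100).all
            (fun m => digitCounts 0 (m:Int) == digitCounts_alt 0 (m:Int))) = true := by decide
        exact eq_of_beq (List.all_eq_true.mp hall N (List.mem_range.mpr hN))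
      · obtain ⟨K, rfl⟩ : ∃ K : ℕ, k = (K:Int) := ⟨k.toNat, (Int.toNat_of_nonneg hkp0).symm⟩
        obtain ⟨N, rfl⟩ : ∃ N : ℕ, n = (N:Int) := ⟨n.toNat, (Int.toNat_of_nonneg hn).symm⟩
        have hKne' : K ≠ 0 := fun h => hk0 (by exact_mod_cast h)
        have hK1 : 1 ≤ K := by omega
        have hK9 : K ≤ 9 := by exact_mod_cast hkp9
        have hNle : N ≤ 2147483648 := by exact_mod_cast hdn2
        have hNb : N + 1 ≤ 10 ^ 40 := by
          have h40 : (2147483648 : ℕ) + 1 ≤ 10 ^ 40 := by norm_num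
          omega
        have hN39 : N < 10 ^ 39 := by
          have h39 : (2147483648 : ℕ) < 10 ^ 39 := by norm_num
          omega
        have hKne : (K:Int) ≠ 0 := by exact_mod_cast hKne'
        have hA : digitCounts (K:Int) (N:Int) = ((sumStep K N 40 : ℕ) : Int) := by
          unfold digitCounts
          rw [if_neg (fun h => hKne h.2)]
          simp only []
          rw [if_neg (fun h => hKne h.1)]
          rw [show ((1:Int)) = ((10 ^ 0 : ℕ):Int) by norm_num]
          rw [goA K N hK1 40 0 0]
          rw [zero_add]
          unfold sumStep
          congr 1
        have hsum2 : (∑ i ∈ Finset.range (N + 1), cdigU K 40 i)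
            = ∑ i ∈ Finset.range (N + 1), cdig K i :=
          Finset.sum_congr rfl fun i hi =>
            (cdig_eq_cdigU K hK1 40 i (by have := Finset.mem_range.mp hi; omega)).symm
        have hBv : digitCounts_alt (K:Int) (N:Int)
            = ((∑ i ∈ Finset.range (N+1), cdig K i : ℕ) : Int) := by
          rw [altB K hK9 N hN39, if_neg hKne', Nat.zero_add]
        exact hA.trans ((Nat.cast_inj.mpr ((sumStep_eq K 40 hK9 N).trans hsum2)).trans
          hBv.symm)
    · have hn0 : n = 0 := le_antisymm (hPre.resolve_left hk09) hn
      subst hn0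
      have hkne : k ≠ 0 := fun h => hk09 (by subst h; exact ⟨le_refl 0, by norm_num⟩)
      rw [a_zero k hkne, alt_zero k hkne]

set_option maxRecDepth 40000 in
theorem digitCounts_changed : Claim_changed_digitCounts := by
  unfold Claim_changed_digitCounts; decide

theorem digitCounts_tight : Claim_exact_digitCounts := by
  unfold Claim_exact_digitCounts
  intro k n hDom hPre hD
  obtain ⟨hk0, hn100⟩ := hD
  subst hk0
  simp only [Dom_digitCounts, pvDomInt, Bool.and_eq_true, decide_eq_true_eq] at hDom
  obtain ⟨-, hdn1, hdn2⟩ := hDom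
  obtain ⟨N, rfl⟩ : ∃ N : ℕ, n = (N:Int) := ⟨n.toNat, (Int.toNat_of_nonneg (by omega)).symm⟩
  have hN100 : 100 ≤ N := by exact_mod_cast hn100
  have hNle : N ≤ 2147483648 := by exact_mod_cast hdn2
  set L := Nat.log 10 N with hLdef
  have hL2 : 2 ≤ L := (Nat.pow_le_iff_le_log (by norm_num) (by omega)).mp (by norm_num; omega)
  have hup : N < 10 ^ (L+1) := Nat.lt_pow_succ_log_self (by norm_num) N
  have hlow : 10 ^ L ≤ N := Nat.pow_log_le_self 10 (by omega)
  have hN39 : N < 10 ^ 39 := by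
    have h39 : (2147483648 : ℕ) < 10 ^ 39 := by norm_num
    omega
  have hA := aA0 N (by omega) (by
    have h40 : (2147483648 : ℕ) < 10 ^ 40 := by norm_num
    omega)
  have hB := altB 0 (by norm_num) N hN39
  rw [if_pos rfl] at hB
  have hB0 : digitCounts_alt 0 (N:Int)
      = ((1 + ∑ i ∈ Finset.range (N+1), cdig 0 i : ℕ) : Int) := by exact_mod_cast hB
  have hS : (∑ t ∈ Finset.range (L + 1), stepN 0 (10 ^ t) N)
      = ∑ i ∈ Finset.range (N+1), cdigU 0 (L+1) i := sumStep_eq 0 (L+1) (by norm_num) N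
  have hU := sum_cdigU0 (L+1) N hup
  have hslack := slack_sum L N hL2 hlow hup
  rw [hA, hB0, hS]
  intro heq
  have heq' : ((∑ i ∈ Finset.range (N+1), cdigU 0 (L+1) i : ℕ) : Int)
      - ((10 ^ L : ℕ) : Int) = ((1 + ∑ i ∈ Finset.range (N+1), cdig 0 i : ℕ) : Int) := heq
  omega
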